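-- pv_equiv track=rewrite | github.com/enabledornot/adventofcode | 2025/day09/day09pt2.py | buildMask
-- ===== SOURCE A (Python) =====
-- def buildMask(tcords, maxX, maxY):
--     # maxX = len(tables[2])
--     # maxY = len(tables[3])
--     mask = []
--     for i in range(maxX):
--         mask.append([1]*maxY)
--     for cordA in tcords:
--         for cordB in tcords:
--             if cordA[0] == cordB[0]:
--                 if cordA[1] != cordB[1]:
--                     for i in range(min(cordA[1],cordB[1]),max(cordA[1],cordB[1])+1):
--                         mask[cordA[0]][i] = 2
--             else:
--                 if cordA[1] == cordB[1]:
--                     for i in range(min(cordA[0],cordB[0]),max(cordA[0],cordB[0]+1)):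
--                         mask[i][cordA[1]] = 2
--     floodFill(mask)
--     return mask
--
-- def floodFill(mask):
--     toDo = [(0,0)]
--     adj = [(0,1),(0,-1),(1,0),(-1,0)]
--     while len(toDo) != 0:
--         cur = toDo.pop(0)
--         if mask[cur[0]][cur[1]] == 1:
--             mask[cur[0]][cur[1]] = 0
--             for m in adj:
--                 pcord = (cur[0]+m[0],cur[1]+m[1])
--                 if pcord[0] >= 0 and pcord[0] < len(mask) and pcord[1] >= 0 and pcord[1] < len(mask[0]):
--                     toDo.append(pcord)
-- ===== SOURCE B (Python) =====
-- # B: instead of drawing a span for every pair of co-linear points, group the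
-- # points per row and per column and paint one min-to-max span each; same BFS fill.
-- def buildMask(tcords, maxX, maxY):
--     mask = [[1] * maxY for _ in range(maxX)]
--     rows = {}
--     cols = {}
--     for (x, y) in tcords:
--         rlo, rhi = rows.get(x, (y, y))
--         rows[x] = (min(rlo, y), max(rhi, y))
--         clo, chi = cols.get(y, (x, x))
--         cols[y] = (min(clo, x), max(chi, x))
--     for x, (lo, hi) in rows.items():
--         if lo < hi:
--             for yy in range(lo, hi + 1):
--                 mask[x][yy] = 2
--     for y, (lo, hi) in cols.items():
--         if lo < hi:
--             for xx in range(lo, hi + 1):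
--                 mask[xx][y] = 2
--     floodFill(mask)
--     return mask
--
-- def floodFill(mask):
--     toDo = [(0, 0)]
--     adj = [(0, 1), (0, -1), (1, 0), (-1, 0)]
--     while len(toDo) != 0:
--         cur = toDo.pop(0)
--         if mask[cur[0]][cur[1]] == 1:
--             mask[cur[0]][cur[1]] = 0
--             for m in adj:
--                 pcord = (cur[0] + m[0], cur[1] + m[1])
--                 if pcord[0] >= 0 and pcord[0] < len(mask) and pcord[1] >= 0 and pcord[1] < len(mask[0]):
--                     toDo.append(pcord)
-- ===== Notes on version B (the rewrite author's own statement) =====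
-- stated objective: alternative
-- what changed: A draws a segment for every ordered pair of co-linear points (nested pair scans repainting overlapping spans); B makes one pass grouping the points per row and per column into min/max dictionaries and paints a single min-to-max span per row/column; the BFS flood fill is unchanged.
import Mathlib
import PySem

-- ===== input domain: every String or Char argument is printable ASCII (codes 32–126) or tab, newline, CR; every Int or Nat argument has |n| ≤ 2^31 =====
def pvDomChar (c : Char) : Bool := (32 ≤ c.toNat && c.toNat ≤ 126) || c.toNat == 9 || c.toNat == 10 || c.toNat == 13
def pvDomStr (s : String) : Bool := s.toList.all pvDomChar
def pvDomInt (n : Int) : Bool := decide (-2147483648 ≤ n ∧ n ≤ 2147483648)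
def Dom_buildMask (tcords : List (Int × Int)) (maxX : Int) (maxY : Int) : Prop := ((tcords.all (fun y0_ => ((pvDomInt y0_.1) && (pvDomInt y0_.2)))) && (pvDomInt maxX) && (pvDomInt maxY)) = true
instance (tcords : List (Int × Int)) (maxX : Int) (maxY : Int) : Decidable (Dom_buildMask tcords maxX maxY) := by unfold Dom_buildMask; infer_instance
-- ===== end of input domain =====

-- B replaces A's pairwise segment drawing (one span per ordered pair of
-- co-linear points) by one pass that groups the points per row and per column
-- and paints a single min-to-max span for each; the BFS flood fill (a shared
-- helper in both Pythons) is unchanged.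

-- shared helpers: both Pythons perform `mask[x][i] = v` and call the same floodFill

/-- Python `mask[x][i] = v` (negative indices wrap; out of range = no-op, excluded by `Pre_`). -/
def pvSetCell (m : List (List Int)) (x i v : Int) : List (List Int) :=
  PySem.List.pySetD m x (PySem.List.pySetD (PySem.List.pyGetD m x []) i v)

/-- the `while len(toDo) != 0` worklist of `floodFill`, with fuel (one unit per pop). -/
def pvFloodLoop : Nat → List (Int × Int) → List (List Int) → List (List Int)
  | 0, _, m => m
  | _ + 1, [], m => m
  | fuel + 1, cur :: rest, m =>
    if PySem.List.pyGetD (PySem.List.pyGetD m cur.1 []) cur.2 0 = 1 then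
      let m' := pvSetCell m cur.1 cur.2 0
      pvFloodLoop fuel
        (rest ++ ([((0 : Int), (1 : Int)), (0, -1), (1, 0), (-1, 0)].map
              (fun mv => (cur.1 + mv.1, cur.2 + mv.2))).filter
            (fun p => decide (0 ≤ p.1) && decide (p.1 < (m'.length : Int)) &&
              decide (0 ≤ p.2) && decide (p.2 < (((PySem.List.pyGetD m' 0 []).length : Int)))))
        m'
    else pvFloodLoop fuel rest m

/-- `floodFill(mask)`: fuel `1 + 4*X*Y` bounds the number of pops (each cell is
converted at most once and each conversion enqueues at most 4 cells). -/
def pvFloodFill (m : List (List Int)) : List (List Int) :=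
  pvFloodLoop (1 + 4 * m.length * (PySem.List.pyGetD m 0 []).length) [(0, 0)] m

-- ===== PORT A =====
def buildMask (tcords : List (Int × Int)) (maxX : Int) (maxY : Int) : List (List Int) :=
  let mask : List (List Int) :=
    (PySem.List.pyRange 0 maxX 1).foldl
      (fun acc _ => acc ++ [PySem.List.pyRepeat [(1 : Int)] maxY]) []
  let mask :=
    tcords.foldl (fun mask cordA =>
      tcords.foldl (fun mask cordB =>
        if cordA.1 = cordB.1 then
          if cordA.2 ≠ cordB.2 then
            (PySem.List.pyRange (min cordA.2 cordB.2) (max cordA.2 cordB.2 + 1) 1).foldl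
              (fun mask i => pvSetCell mask cordA.1 i 2) mask
          else mask
        else
          if cordA.2 = cordB.2 then
            (PySem.List.pyRange (min cordA.1 cordB.1) (max cordA.1 (cordB.1 + 1)) 1).foldl
              (fun mask i => pvSetCell mask i cordA.2 2) mask
          else mask) mask) mask
  pvFloodFill mask

-- ===== PORT B =====
def buildMask_alt (tcords : List (Int × Int)) (maxX : Int) (maxY : Int) : List (List Int) :=
  let mask : List (List Int) :=
    (PySem.List.pyRange 0 maxX 1).map (fun _ => PySem.List.pyRepeat [(1 : Int)] maxY)
  let groups :=
    tcords.foldl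
      (fun (d : PySem.Dict Int (Int × Int) × PySem.Dict Int (Int × Int)) p =>
        (d.1.insert p.1 (min (d.1.getD p.1 (p.2, p.2)).1 p.2, max (d.1.getD p.1 (p.2, p.2)).2 p.2),
         d.2.insert p.2 (min (d.2.getD p.2 (p.1, p.1)).1 p.1, max (d.2.getD p.2 (p.1, p.1)).2 p.1)))
      (PySem.Dict.empty, PySem.Dict.empty)
  let mask :=
    groups.1.items.foldl (fun mask e =>
      if e.2.1 < e.2.2 then
        (PySem.List.pyRange e.2.1 (e.2.2 + 1) 1).foldl
          (fun mask yy => pvSetCell mask e.1 yy 2) mask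
      else mask) mask
  let mask :=
    groups.2.items.foldl (fun mask e =>
      if e.2.1 < e.2.2 then
        (PySem.List.pyRange e.2.1 (e.2.2 + 1) 1).foldl
          (fun mask xx => pvSetCell mask xx e.1 2) mask
      else mask) mask
  pvFloodFill mask

-- ===== PRECONDITION & SPEC =====
-- Pre_ excludes exactly the inputs on which the Python raises IndexError: an
-- empty grid (maxX < 1 or maxY < 1, where the flood fill's first read fails),
-- and any co-linear pair whose segment writes outside [-maxX,maxX) × [-maxY,maxY).
def Pre_buildMask (tcords : List (Int × Int)) (maxX : Int) (maxY : Int) : Prop :=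
  1 ≤ maxX ∧ 1 ≤ maxY ∧
    ∀ p ∈ tcords, ∀ q ∈ tcords,
      (p.1 = q.1 → p.2 ≠ q.2 →
        -maxX ≤ p.1 ∧ p.1 < maxX ∧ -maxY ≤ min p.2 q.2 ∧ max p.2 q.2 < maxY) ∧
      (p.1 ≠ q.1 → p.2 = q.2 →
        -maxY ≤ p.2 ∧ p.2 < maxY ∧ -maxX ≤ min p.1 q.1 ∧ max p.1 q.1 < maxX)
instance (tcords : List (Int × Int)) (maxX : Int) (maxY : Int) : Decidable (Pre_buildMask tcords maxX maxY) := by unfold Pre_buildMask; infer_instance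

def pvWitness_buildMask : (List (Int × Int)) × Int × Int := ([(0, 0), (0, 2), (2, 2)], 3, 3)

def Spec_buildMask (tcords : List (Int × Int)) (maxX : Int) (maxY : Int) (out : List (List Int)) : Prop := out = buildMask_alt tcords maxX maxY
instance (tcords : List (Int × Int)) (maxX : Int) (maxY : Int) (out : List (List Int)) : Decidable (Spec_buildMask tcords maxX maxY out) := by unfold Spec_buildMask; infer_instance

-- ===== CLAIM (what is proved, stated in full; the proofs are below) =====
def Claim_equal_buildMask : Prop := ∀ (tcords : List (Int × Int)) (maxX : Int) (maxY : Int), Dom_buildMask tcords maxX maxY → Pre_buildMask tcords maxX maxY → Spec_buildMask tcords maxX maxY (buildMask tcords maxX maxY)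

-- ===== LEMMAS AND PROOFS =====

def pvGet (m : List (List Int)) (r c : Nat) : Int := (m.getD r []).getD c 0

theorem pvIdx_lt {n : Nat} {x : Int} {r : Nat} (h : PySem.List.pyIdx? n x = some r) : r < n := by
  unfold PySem.List.pyIdx? at h
  split_ifs at h <;> simp_all <;> omega

theorem pySetD_eq_match {α : Type} (xs : List α) (i : Int) (v : α) :
    PySem.List.pySetD xs i v =
      match PySem.List.pyIdx? xs.length i with
      | some k => xs.set k v
      | none => xs := by
  unfold PySem.List.pySetD PySem.List.pySet?
  cases h : PySem.List.pyIdx? xs.length i <;> simp [h]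

theorem pyGetD_eq_match {α : Type} (xs : List α) (i : Int) (d : α) :
    PySem.List.pyGetD xs i d =
      match PySem.List.pyIdx? xs.length i with
      | some k => xs.getD k d
      | none => d := by
  unfold PySem.List.pyGetD PySem.List.pyGet?
  cases h : PySem.List.pyIdx? xs.length i with
  | none => simp [h]
  | some k =>
    have hk := pvIdx_lt h
    simp [h, List.getD, List.getElem?_eq_getElem hk]

theorem getD_set (l : List (List Int)) (i j : Nat) (a : List Int) :
    (l.set i a).getD j [] = if i = j ∧ i < l.length then a else l.getD j [] := by
  simp only [List.getD, List.getElem?_set]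
  split_ifs with h h1 h2 h3 <;> simp_all <;> omega

theorem getD_set_int (l : List Int) (i j : Nat) (a : Int) :
    (l.set i a).getD j 0 = if i = j ∧ i < l.length then a else l.getD j 0 := by
  simp only [List.getD, List.getElem?_set]
  split_ifs with h h1 h2 h3 <;> simp_all <;> omega

theorem length_pvSetCell (m : List (List Int)) (x i v : Int) :
    (pvSetCell m x i v).length = m.length := by
  unfold pvSetCell
  rw [pySetD_eq_match]
  cases h : PySem.List.pyIdx? m.length x <;> simp

theorem pvGet_pvSetCell (m : List (List Int)) (x i v : Int) (r c : Nat) :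
    pvGet (pvSetCell m x i v) r c =
      if PySem.List.pyIdx? m.length x = some r ∧
         PySem.List.pyIdx? (m.getD r []).length i = some c then v
      else pvGet m r c := by
  unfold pvSetCell pvGet
  rw [pySetD_eq_match, pyGetD_eq_match]
  by_cases hC : (PySem.List.pyIdx? m.length x = some r ∧
      PySem.List.pyIdx? (m.getD r []).length i = some c)
  · rw [if_pos hC]
    obtain ⟨hC1, hC2⟩ := hC
    rw [hC1]
    have hr := pvIdx_lt hC1
    rw [pySetD_eq_match, hC2]
    simp only
    rw [getD_set, if_pos ⟨rfl, hr⟩, getD_set_int, if_pos ⟨rfl, pvIdx_lt hC2⟩]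
  · rw [if_neg hC]
    cases hx : PySem.List.pyIdx? m.length x with
    | none => simp
    | some r' =>
      have hr' := pvIdx_lt hx
      rw [pySetD_eq_match]
      simp only
      rw [getD_set]
      split_ifs with h1
      · -- r' = r: column index must not hit c
        obtain ⟨rfl, _⟩ := h1
        cases hi : PySem.List.pyIdx? (m.getD r' []).length i with
        | none => simp
        | some c' =>
          rw [getD_set_int]
          split_ifs with h2
          · exfalso; obtain ⟨rfl, _⟩ := h2; exact hC ⟨hx, hi⟩
          · rfl
      · rfl
theorem rowlen_pvSetCell (m : List (List Int)) (x i v : Int) (r : Nat) :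
    ((pvSetCell m x i v).getD r []).length = (m.getD r []).length := by
  unfold pvSetCell
  rw [pySetD_eq_match, pyGetD_eq_match]
  cases hx : PySem.List.pyIdx? m.length x with
  | none => simp
  | some r' =>
    rw [pySetD_eq_match]
    cases hi : PySem.List.pyIdx? (m.getD r' []).length i <;>
      · simp only
        rw [getD_set]
        split_ifs with h1 <;> simp_all

def pvWrite (m : List (List Int)) (w : Int × Int) : List (List Int) := pvSetCell m w.1 w.2 2

def pvHits (m : List (List Int)) (w : Int × Int) (r c : Nat) : Prop :=
  PySem.List.pyIdx? m.length w.1 = some r ∧ PySem.List.pyIdx? (m.getD r []).length w.2 = some c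

theorem length_foldl_write (L : List (Int × Int)) (m : List (List Int)) :
    (L.foldl pvWrite m).length = m.length := by
  induction L generalizing m with
  | nil => rfl
  | cons w T ih => rw [List.foldl_cons, ih, pvWrite, length_pvSetCell]

theorem rowlen_foldl_write (L : List (Int × Int)) (m : List (List Int)) (r : Nat) :
    ((L.foldl pvWrite m).getD r []).length = (m.getD r []).length := by
  induction L generalizing m with
  | nil => rfl
  | cons w T ih => rw [List.foldl_cons, ih, pvWrite, rowlen_pvSetCell]

theorem pvHits_pvSetCell (m : List (List Int)) (x i v : Int) (w : Int × Int) (r c : Nat) :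
    pvHits (pvSetCell m x i v) w r c ↔ pvHits m w r c := by
  unfold pvHits
  rw [length_pvSetCell, rowlen_pvSetCell]

theorem pvGet_foldl_write_of_not (L : List (Int × Int)) (m : List (List Int)) (r c : Nat)
    (h : ¬ ∃ w ∈ L, pvHits m w r c) :
    pvGet (L.foldl pvWrite m) r c = pvGet m r c := by
  induction L generalizing m with
  | nil => rfl
  | cons w T ih =>
    rw [List.foldl_cons]
    have hw : ¬ pvHits m w r c := fun hh => h ⟨w, List.mem_cons_self, hh⟩
    have hT : ¬ ∃ u ∈ T, pvHits (pvWrite m w) u r c := by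
      rintro ⟨u, hu, huh⟩
      exact h ⟨u, List.mem_cons_of_mem _ hu, (pvHits_pvSetCell m w.1 w.2 2 u r c).mp huh⟩
    rw [ih _ hT, pvWrite, pvGet_pvSetCell, if_neg (by exact hw)]

theorem pvGet_foldl_write_of (L : List (Int × Int)) (m : List (List Int)) (r c : Nat)
    (h : ∃ w ∈ L, pvHits m w r c) :
    pvGet (L.foldl pvWrite m) r c = 2 := by
  induction L generalizing m with
  | nil => exact absurd h (by simp)
  | cons w T ih =>
    rw [List.foldl_cons]
    by_cases hT : ∃ u ∈ T, pvHits (pvWrite m w) u r c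
    · exact ih _ hT
    · obtain ⟨u, hu, huh⟩ := h
      rcases List.mem_cons.mp hu with rfl | hmem
      · rw [pvGet_foldl_write_of_not _ _ _ _ hT, pvWrite, pvGet_pvSetCell, if_pos (by exact huh)]
      · exact absurd ⟨u, hmem, (pvHits_pvSetCell m w.1 w.2 2 u r c).mpr huh⟩ hT

theorem getD_eq_getElem_of_lt (G : List (List Int)) (r : Nat) (hr : r < G.length) :
    G.getD r [] = G[r] := by
  rw [List.getD_eq_getElem?_getD, List.getElem?_eq_getElem hr]; rfl

theorem pvGet_eq_getElem (G : List (List Int)) (r c : Nat) (hr : r < G.length)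
    (hc : c < G[r].length) : pvGet G r c = G[r][c] := by
  unfold pvGet
  rw [getD_eq_getElem_of_lt G r hr, List.getD_eq_getElem?_getD, List.getElem?_eq_getElem hc]
  rfl

theorem foldl_write_ext (L1 L2 : List (Int × Int)) (m : List (List Int))
    (h : ∀ w, w ∈ L1 ↔ w ∈ L2) :
    L1.foldl pvWrite m = L2.foldl pvWrite m := by
  apply List.ext_getElem
  · rw [length_foldl_write, length_foldl_write]
  · intro r h1 h2
    apply List.ext_getElem
    · rw [← getD_eq_getElem_of_lt _ _ h1, ← getD_eq_getElem_of_lt _ _ h2,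
        rowlen_foldl_write, rowlen_foldl_write]
    · intro c hc1 hc2
      rw [← pvGet_eq_getElem _ _ _ h1 hc1, ← pvGet_eq_getElem _ _ _ h2 hc2]
      by_cases hE : ∃ w ∈ L1, pvHits m w r c
      · rw [pvGet_foldl_write_of _ _ _ _ hE, pvGet_foldl_write_of _ _ _ _ (by
          obtain ⟨w, hw, hh⟩ := hE; exact ⟨w, (h w).mp hw, hh⟩)]
      · rw [pvGet_foldl_write_of_not _ _ _ _ hE, pvGet_foldl_write_of_not _ _ _ _ (by
          rintro ⟨w, hw, hh⟩; exact hE ⟨w, (h w).mpr hw, hh⟩)]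

theorem pv_foldl_flatMap {α β γ : Type} (l : List α) (f : α → List β) (g : γ → β → γ) (init : γ) :
    (l.flatMap f).foldl g init = l.foldl (fun acc x => (f x).foldl g acc) init := by
  induction l generalizing init with
  | nil => rfl
  | cons x xs ih => rw [List.flatMap_cons, List.foldl_append, List.foldl_cons, ih]

def pvPairW (p q : Int × Int) : List (Int × Int) :=
  if p.1 = q.1 then
    if p.2 ≠ q.2 then
      (PySem.List.pyRange (min p.2 q.2) (max p.2 q.2 + 1) 1).map (fun i => (p.1, i))
    else []
  else
    if p.2 = q.2 then
      (PySem.List.pyRange (min p.1 q.1) (max p.1 (q.1 + 1)) 1).map (fun i => (i, p.2))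
    else []

def pvWritesA (t : List (Int × Int)) : List (Int × Int) :=
  t.flatMap (fun p => t.flatMap (fun q => pvPairW p q))

theorem drawA_eq (t : List (Int × Int)) (m : List (List Int)) :
    t.foldl (fun mask cordA =>
      t.foldl (fun mask cordB =>
        if cordA.1 = cordB.1 then
          if cordA.2 ≠ cordB.2 then
            (PySem.List.pyRange (min cordA.2 cordB.2) (max cordA.2 cordB.2 + 1) 1).foldl
              (fun mask i => pvSetCell mask cordA.1 i 2) mask
          else mask
        else
          if cordA.2 = cordB.2 then
            (PySem.List.pyRange (min cordA.1 cordB.1) (max cordA.1 (cordB.1 + 1)) 1).foldl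
              (fun mask i => pvSetCell mask i cordA.2 2) mask
          else mask) mask) m
    = (pvWritesA t).foldl pvWrite m := by
  rw [pvWritesA, pv_foldl_flatMap]
  apply PySem.List.foldl_congr_mem
  intro acc p _
  rw [pv_foldl_flatMap]
  apply PySem.List.foldl_congr_mem
  intro acc2 q _
  unfold pvPairW
  split_ifs <;> simp [List.foldl_map, pvWrite]

def pvSpanW (mk : Int → Int → Int × Int) (e : Int × (Int × Int)) : List (Int × Int) :=
  if e.2.1 < e.2.2 then (PySem.List.pyRange e.2.1 (e.2.2 + 1) 1).map (fun i => mk e.1 i) else []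

def pvMerge : Option (Int × Int) → Int → Int × Int
  | none, y => (y, y)
  | some lh, y => (min lh.1 y, max lh.2 y)

def pvAgg (key val : Int × Int → Int) (t : List (Int × Int)) (x : Int) : Option (Int × Int) :=
  t.foldl (fun o p => if key p = x then some (pvMerge o (val p)) else o) none

def pvGrpFold (key val : Int × Int → Int) (t : List (Int × Int)) : PySem.Dict Int (Int × Int) :=
  t.foldl (fun d p =>
    d.insert (key p) (min (d.getD (key p) (val p, val p)).1 (val p),
                      max (d.getD (key p) (val p, val p)).2 (val p))) PySem.Dict.empty

theorem pvGrp_step_get? (d : PySem.Dict Int (Int × Int)) (p : Int × Int)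
    (key val : Int × Int → Int) (x : Int) :
    (d.insert (key p) (min (d.getD (key p) (val p, val p)).1 (val p),
                       max (d.getD (key p) (val p, val p)).2 (val p))).get? x
    = if key p = x then some (pvMerge (d.get? x) (val p)) else d.get? x := by
  rw [PySem.Dict.get?_insert]
  by_cases h : key p = x
  · subst h
    rw [if_pos rfl, if_pos rfl, PySem.Dict.getD_eq_get?_getD]
    cases d.get? (key p) <;> simp [pvMerge]
  · rw [if_neg (fun hh => h hh.symm), if_neg h]

theorem get?_foldl_grp (key val : Int × Int → Int) (t : List (Int × Int)) (x : Int) :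
    ∀ d : PySem.Dict Int (Int × Int),
    (t.foldl (fun d p =>
      d.insert (key p) (min (d.getD (key p) (val p, val p)).1 (val p),
                        max (d.getD (key p) (val p, val p)).2 (val p))) d).get? x
    = t.foldl (fun o p => if key p = x then some (pvMerge o (val p)) else o) (d.get? x) := by
  induction t with
  | nil => intro d; rfl
  | cons p T ih =>
    intro d
    rw [List.foldl_cons, List.foldl_cons, ih, pvGrp_step_get? d p key val x]

theorem get?_pvGrpFold (key val : Int × Int → Int) (t : List (Int × Int)) (x : Int) :
    (pvGrpFold key val t).get? x = pvAgg key val t x := by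
  rw [pvGrpFold, get?_foldl_grp, pvAgg, PySem.Dict.get?_empty]

theorem pvAgg_append (key val : Int × Int → Int) (t : List (Int × Int)) (p : Int × Int) (x : Int) :
    pvAgg key val (t ++ [p]) x =
      if key p = x then some (pvMerge (pvAgg key val t x) (val p)) else pvAgg key val t x := by
  rw [pvAgg, List.foldl_append]; rfl

theorem pvAgg_eq_none_iff (key val : Int × Int → Int) (t : List (Int × Int)) (x : Int) :
    pvAgg key val t x = none ↔ ∀ p ∈ t, key p ≠ x := by
  induction t using List.reverseRecOn with
  | nil => simp [pvAgg]
  | append_singleton T p ih =>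
    rw [pvAgg_append]
    by_cases h : key p = x
    · simp only [if_pos h]
      constructor
      · intro hh; exact absurd hh (by simp)
      · intro hh; exact absurd h (hh p (by simp))
    · simp only [if_neg h, ih]
      constructor
      · intro hh q hq
        rcases List.mem_append.mp hq with hq | hq
        · exact hh q hq
        · simp at hq; subst hq; exact h
      · intro hh q hq; exact hh q (List.mem_append_left _ hq)

theorem pvAgg_bounds (key val : Int × Int → Int) (t : List (Int × Int)) (x lo hi : Int)
    (h : pvAgg key val t x = some (lo, hi)) :
    (∃ p ∈ t, key p = x ∧ val p = lo) ∧ (∃ p ∈ t, key p = x ∧ val p = hi) ∧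
      ∀ p ∈ t, key p = x → lo ≤ val p ∧ val p ≤ hi := by
  induction t using List.reverseRecOn generalizing lo hi with
  | nil => simp [pvAgg] at h
  | append_singleton T p ih =>
    rw [pvAgg_append] at h
    by_cases hk : key p = x
    · rw [if_pos hk] at h
      cases hA : pvAgg key val T x with
      | none =>
        rw [hA] at h
        simp only [pvMerge, Option.some_inj, Prod.mk.injEq] at h
        obtain ⟨h1, h2⟩ := h
        subst h1; subst h2
        refine ⟨⟨p, by simp, hk, rfl⟩, ⟨p, by simp, hk, rfl⟩, ?_⟩
        intro q hq hkq
        rcases List.mem_append.mp hq with hq | hq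
        · exact absurd hkq ((pvAgg_eq_none_iff key val T x).mp hA q hq)
        · simp at hq; subst hq; omega
      | some lh =>
        rw [hA] at h
        obtain ⟨plo, phi, hall⟩ := ih lh.1 lh.2 (by rw [hA])
        simp only [pvMerge, Option.some_inj, Prod.mk.injEq] at h
        obtain ⟨h1, h2⟩ := h
        replace h1 : lo = min lh.1 (val p) := h1.symm
        replace h2 : hi = max lh.2 (val p) := h2.symm
        constructor
        · rcases le_total lh.1 (val p) with hle | hle
          · obtain ⟨q, hq, hqk, hqv⟩ := plo
            exact ⟨q, List.mem_append_left _ hq, hqk, by omega⟩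
          · exact ⟨p, by simp, hk, by omega⟩
        constructor
        · rcases le_total (val p) lh.2 with hle | hle
          · obtain ⟨q, hq, hqk, hqv⟩ := phi
            exact ⟨q, List.mem_append_left _ hq, hqk, by omega⟩
          · exact ⟨p, by simp, hk, by omega⟩
        · intro q hq hkq
          rcases List.mem_append.mp hq with hq | hq
          · have := hall q hq hkq; omega
          · simp at hq; subst hq; omega
    · rw [if_neg hk] at h
      obtain ⟨plo, phi, hall⟩ := ih lo hi h
      refine ⟨⟨plo.choose, List.mem_append_left _ plo.choose_spec.1, plo.choose_spec.2⟩,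
              ⟨phi.choose, List.mem_append_left _ phi.choose_spec.1, phi.choose_spec.2⟩, ?_⟩
      intro q hq hkq
      rcases List.mem_append.mp hq with hq | hq
      · exact hall q hq hkq
      · simp at hq; subst hq; exact absurd hkq hk

theorem pv_span_iff_row (key val : Int × Int → Int) (t : List (Int × Int)) (x i : Int) :
    (∃ p ∈ t, ∃ q ∈ t, key p = x ∧ key q = x ∧ val p ≠ val q ∧
        min (val p) (val q) ≤ i ∧ i < max (val p) (val q) + 1)
    ↔ (∃ lo hi, pvAgg key val t x = some (lo, hi) ∧ lo < hi ∧ lo ≤ i ∧ i < hi + 1) := by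
  constructor
  · rintro ⟨p, hp, q, hq, hkp, hkq, hne, h1, h2⟩
    cases hA : pvAgg key val t x with
    | none => exact absurd hkp ((pvAgg_eq_none_iff key val t x).mp hA p hp)
    | some lh =>
      obtain ⟨_, _, hall⟩ := pvAgg_bounds key val t x lh.1 lh.2 (by rw [hA])
      have hbp := hall p hp hkp
      have hbq := hall q hq hkq
      exact ⟨lh.1, lh.2, (congrArg some Prod.mk.eta).symm, by omega, by omega, by omega⟩
  · rintro ⟨lo, hi, hA, hlt, h1, h2⟩
    obtain ⟨⟨p, hp, hkp, hvp⟩, ⟨q, hq, hkq, hvq⟩, _⟩ := pvAgg_bounds key val t x lo hi hA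
    exact ⟨p, hp, q, hq, hkp, hkq, by omega, by omega, by omega⟩

theorem pv_span_iff_col (key val : Int × Int → Int) (t : List (Int × Int)) (x i : Int) :
    (∃ p ∈ t, ∃ q ∈ t, key p = x ∧ key q = x ∧ val p ≠ val q ∧
        min (val p) (val q) ≤ i ∧ i < max (val p) (val q + 1))
    ↔ (∃ lo hi, pvAgg key val t x = some (lo, hi) ∧ lo < hi ∧ lo ≤ i ∧ i < hi + 1) := by
  constructor
  · rintro ⟨p, hp, q, hq, hkp, hkq, hne, h1, h2⟩
    cases hA : pvAgg key val t x with
    | none => exact absurd hkp ((pvAgg_eq_none_iff key val t x).mp hA p hp)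
    | some lh =>
      obtain ⟨_, _, hall⟩ := pvAgg_bounds key val t x lh.1 lh.2 (by rw [hA])
      have hbp := hall p hp hkp
      have hbq := hall q hq hkq
      exact ⟨lh.1, lh.2, (congrArg some Prod.mk.eta).symm, by omega, by omega, by omega⟩
  · rintro ⟨lo, hi, hA, hlt, h1, h2⟩
    obtain ⟨⟨p, hp, hkp, hvp⟩, ⟨q, hq, hkq, hvq⟩, _⟩ := pvAgg_bounds key val t x lo hi hA
    exact ⟨p, hp, q, hq, hkp, hkq, by omega, by omega, by omega⟩

theorem nodup_keys_pvGrpFold (key val : Int × Int → Int) (t : List (Int × Int)) :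
    (pvGrpFold key val t).keys.Nodup := by
  rw [pvGrpFold]
  exact PySem.Dict.nodup_keys_foldl_insert_key t key
    (fun d p => (min (d.getD (key p) (val p, val p)).1 (val p),
                 max (d.getD (key p) (val p, val p)).2 (val p)))
    PySem.Dict.empty PySem.Dict.nodup_keys_empty

theorem mem_items_pvGrpFold (key val : Int × Int → Int) (t : List (Int × Int))
    (e : Int × (Int × Int)) :
    e ∈ (pvGrpFold key val t).items ↔ pvAgg key val t e.1 = some e.2 := by
  rw [← get?_pvGrpFold]
  constructor
  · intro h
    have h' : (e.1, e.2) ∈ (pvGrpFold key val t).items := by rw [Prod.mk.eta]; exact h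
    exact PySem.Dict.get?_of_mem_items _ h' (nodup_keys_pvGrpFold key val t)
  · intro h
    have h' := PySem.Dict.mem_items_of_get?_eq_some _ h
    rwa [Prod.mk.eta] at h'

theorem mem_pvPairW (p q w : Int × Int) :
    w ∈ pvPairW p q ↔
      (p.1 = q.1 ∧ p.2 ≠ q.2 ∧ min p.2 q.2 ≤ w.2 ∧ w.2 < max p.2 q.2 + 1 ∧ w.1 = p.1)
      ∨ (p.1 ≠ q.1 ∧ p.2 = q.2 ∧ min p.1 q.1 ≤ w.1 ∧ w.1 < max p.1 (q.1 + 1) ∧ w.2 = p.2) := by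
  obtain ⟨wx, wy⟩ := w
  unfold pvPairW
  split_ifs with h1 h2 h3
  · simp only [List.mem_map, PySem.List.mem_pyRange_one, Prod.mk.injEq]
    constructor
    · rintro ⟨i, ⟨hi1, hi2⟩, hx, hy⟩
      exact Or.inl ⟨h1, h2, by omega, by omega, hx.symm⟩
    · rintro (⟨_, _, h3, h4, h5⟩ | ⟨hne, _, _, _, _⟩)
      · exact ⟨wy, ⟨h3, h4⟩, h5.symm, rfl⟩
      · exact absurd h1 hne
  · simp only [List.not_mem_nil, false_iff]
    push_neg at h2
    rintro (⟨_, hne, _⟩ | ⟨hne, _⟩)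
    · exact hne h2
    · exact hne h1
  · simp only [List.mem_map, PySem.List.mem_pyRange_one, Prod.mk.injEq]
    constructor
    · rintro ⟨i, ⟨hi1, hi2⟩, hx, hy⟩
      exact Or.inr ⟨h1, h3, by omega, by omega, hy.symm⟩
    · rintro (⟨heq, _⟩ | ⟨_, _, h4, h5, h6⟩)
      · exact absurd heq h1
      · exact ⟨wx, ⟨h4, h5⟩, rfl, h6.symm⟩
  · simp only [List.not_mem_nil, false_iff]
    rintro (⟨heq, _⟩ | ⟨_, heq, _⟩)
    · exact h1 heq
    · exact h3 heq

theorem mem_writesA (t : List (Int × Int)) (wx wy : Int) :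
    (wx, wy) ∈ pvWritesA t ↔
      (∃ p ∈ t, ∃ q ∈ t, p.1 = wx ∧ q.1 = wx ∧ p.2 ≠ q.2 ∧
          min p.2 q.2 ≤ wy ∧ wy < max p.2 q.2 + 1)
      ∨ (∃ p ∈ t, ∃ q ∈ t, p.2 = wy ∧ q.2 = wy ∧ p.1 ≠ q.1 ∧
          min p.1 q.1 ≤ wx ∧ wx < max p.1 (q.1 + 1)) := by
  unfold pvWritesA
  simp only [List.mem_flatMap, mem_pvPairW]
  constructor
  · rintro ⟨p, hp, q, hq, hcase⟩
    rcases hcase with ⟨h1, h2, h3, h4, h5⟩ | ⟨h1, h2, h3, h4, h5⟩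
    · exact Or.inl ⟨p, hp, q, hq, h5.symm, by omega, h2, h3, h4⟩
    · exact Or.inr ⟨p, hp, q, hq, h5.symm, by omega, h1, h3, h4⟩
  · rintro (⟨p, hp, q, hq, h1, h2, h3, h4, h5⟩ | ⟨p, hp, q, hq, h1, h2, h3, h4, h5⟩)
    · exact ⟨p, hp, q, hq, Or.inl ⟨by omega, h3, h4, h5, h1.symm⟩⟩
    · exact ⟨p, hp, q, hq, Or.inr ⟨h3, by omega, h4, h5, h1.symm⟩⟩

def pvRowW (t : List (Int × Int)) : List (Int × Int) :=
  (pvGrpFold (fun p => p.1) (fun p => p.2) t).items.flatMap (pvSpanW (fun x i => (x, i)))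

def pvColW (t : List (Int × Int)) : List (Int × Int) :=
  (pvGrpFold (fun p => p.2) (fun p => p.1) t).items.flatMap (pvSpanW (fun y i => (i, y)))

theorem mem_pvRowW (t : List (Int × Int)) (wx wy : Int) :
    (wx, wy) ∈ pvRowW t ↔
      ∃ lo hi, pvAgg (fun p => p.1) (fun p => p.2) t wx = some (lo, hi) ∧
        lo < hi ∧ lo ≤ wy ∧ wy < hi + 1 := by
  unfold pvRowW pvSpanW
  simp only [List.mem_flatMap, mem_items_pvGrpFold]
  constructor
  · rintro ⟨e, he, hw⟩
    split_ifs at hw with hlt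
    · simp only [List.mem_map, PySem.List.mem_pyRange_one, Prod.ext_iff] at hw
      obtain ⟨i, ⟨hi1, hi2⟩, hx, hy⟩ := hw
      subst hx
      exact ⟨e.2.1, e.2.2, by rw [Prod.mk.eta]; exact he, hlt, by omega, by omega⟩
    · simp at hw
  · rintro ⟨lo, hi, hA, hlt, h1, h2⟩
    refine ⟨(wx, (lo, hi)), hA, ?_⟩
    rw [if_pos hlt]
    simp only [List.mem_map, PySem.List.mem_pyRange_one]
    exact ⟨wy, ⟨h1, h2⟩, rfl⟩

theorem mem_pvColW (t : List (Int × Int)) (wx wy : Int) :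
    (wx, wy) ∈ pvColW t ↔
      ∃ lo hi, pvAgg (fun p => p.2) (fun p => p.1) t wy = some (lo, hi) ∧
        lo < hi ∧ lo ≤ wx ∧ wx < hi + 1 := by
  unfold pvColW pvSpanW
  simp only [List.mem_flatMap, mem_items_pvGrpFold]
  constructor
  · rintro ⟨e, he, hw⟩
    split_ifs at hw with hlt
    · simp only [List.mem_map, PySem.List.mem_pyRange_one, Prod.ext_iff] at hw
      obtain ⟨i, ⟨hi1, hi2⟩, hx, hy⟩ := hw
      subst hy
      exact ⟨e.2.1, e.2.2, by rw [Prod.mk.eta]; exact he, hlt, by omega, by omega⟩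
    · simp at hw
  · rintro ⟨lo, hi, hA, hlt, h1, h2⟩
    refine ⟨(wy, (lo, hi)), hA, ?_⟩
    rw [if_pos hlt]
    simp only [List.mem_map, PySem.List.mem_pyRange_one]
    exact ⟨wx, ⟨h1, h2⟩, rfl⟩

theorem pv_writes_ext (t : List (Int × Int)) (w : Int × Int) :
    w ∈ pvWritesA t ↔ w ∈ pvRowW t ++ pvColW t := by
  obtain ⟨wx, wy⟩ := w
  rw [List.mem_append, mem_writesA t wx wy, mem_pvRowW t wx wy, mem_pvColW t wx wy]
  exact or_congr (pv_span_iff_row (fun p => p.1) (fun p => p.2) t wx wy)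
    (pv_span_iff_col (fun p => p.2) (fun p => p.1) t wy wx)

theorem pv_foldl_prod {α β γ : Type} (t : List α) (f : β → α → β) (g : γ → α → γ) :
    ∀ (a : β) (b : γ), t.foldl (fun d p => (f d.1 p, g d.2 p)) (a, b) = (t.foldl f a, t.foldl g b) := by
  induction t with
  | nil => intro a b; rfl
  | cons p T ih => intro a b; rw [List.foldl_cons, List.foldl_cons, List.foldl_cons]; exact ih _ _

theorem drawB_row_eq (items : List (Int × (Int × Int))) (m : List (List Int)) :
    items.foldl (fun mask e =>
      if e.2.1 < e.2.2 then
        (PySem.List.pyRange e.2.1 (e.2.2 + 1) 1).foldl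
          (fun mask yy => pvSetCell mask e.1 yy 2) mask
      else mask) m
    = (items.flatMap (pvSpanW (fun x i => (x, i)))).foldl pvWrite m := by
  rw [pv_foldl_flatMap]
  apply PySem.List.foldl_congr_mem
  intro acc e _
  unfold pvSpanW
  split_ifs <;> simp [List.foldl_map, pvWrite]

theorem drawB_col_eq (items : List (Int × (Int × Int))) (m : List (List Int)) :
    items.foldl (fun mask e =>
      if e.2.1 < e.2.2 then
        (PySem.List.pyRange e.2.1 (e.2.2 + 1) 1).foldl
          (fun mask xx => pvSetCell mask xx e.1 2) mask
      else mask) m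
    = (items.flatMap (pvSpanW (fun y i => (i, y)))).foldl pvWrite m := by
  rw [pv_foldl_flatMap]
  apply PySem.List.foldl_congr_mem
  intro acc e _
  unfold pvSpanW
  split_ifs <;> simp [List.foldl_map, pvWrite]

theorem pv_main_draw (t : List (Int × Int)) (m : List (List Int)) :
    t.foldl (fun mask cordA =>
      t.foldl (fun mask cordB =>
        if cordA.1 = cordB.1 then
          if cordA.2 ≠ cordB.2 then
            (PySem.List.pyRange (min cordA.2 cordB.2) (max cordA.2 cordB.2 + 1) 1).foldl
              (fun mask i => pvSetCell mask cordA.1 i 2) mask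
          else mask
        else
          if cordA.2 = cordB.2 then
            (PySem.List.pyRange (min cordA.1 cordB.1) (max cordA.1 (cordB.1 + 1)) 1).foldl
              (fun mask i => pvSetCell mask i cordA.2 2) mask
          else mask) mask) m
    = ((t.foldl
        (fun (d : PySem.Dict Int (Int × Int) × PySem.Dict Int (Int × Int)) p =>
          (d.1.insert p.1 (min (d.1.getD p.1 (p.2, p.2)).1 p.2, max (d.1.getD p.1 (p.2, p.2)).2 p.2),
           d.2.insert p.2 (min (d.2.getD p.2 (p.1, p.1)).1 p.1, max (d.2.getD p.2 (p.1, p.1)).2 p.1)))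
        (PySem.Dict.empty, PySem.Dict.empty)).2.items.foldl (fun mask e =>
          if e.2.1 < e.2.2 then
            (PySem.List.pyRange e.2.1 (e.2.2 + 1) 1).foldl
              (fun mask xx => pvSetCell mask xx e.1 2) mask
          else mask)
        ((t.foldl
          (fun (d : PySem.Dict Int (Int × Int) × PySem.Dict Int (Int × Int)) p =>
            (d.1.insert p.1 (min (d.1.getD p.1 (p.2, p.2)).1 p.2, max (d.1.getD p.1 (p.2, p.2)).2 p.2),
             d.2.insert p.2 (min (d.2.getD p.2 (p.1, p.1)).1 p.1, max (d.2.getD p.2 (p.1, p.1)).2 p.1)))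
          (PySem.Dict.empty, PySem.Dict.empty)).1.items.foldl (fun mask e =>
            if e.2.1 < e.2.2 then
              (PySem.List.pyRange e.2.1 (e.2.2 + 1) 1).foldl
                (fun mask yy => pvSetCell mask e.1 yy 2) mask
            else mask) m)) := by
  have hgrp : (t.foldl
      (fun (d : PySem.Dict Int (Int × Int) × PySem.Dict Int (Int × Int)) p =>
        (d.1.insert p.1 (min (d.1.getD p.1 (p.2, p.2)).1 p.2, max (d.1.getD p.1 (p.2, p.2)).2 p.2),
         d.2.insert p.2 (min (d.2.getD p.2 (p.1, p.1)).1 p.1, max (d.2.getD p.2 (p.1, p.1)).2 p.1)))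
      (PySem.Dict.empty, PySem.Dict.empty))
      = (pvGrpFold (fun p => p.1) (fun p => p.2) t, pvGrpFold (fun p => p.2) (fun p => p.1) t) := by
    rw [pvGrpFold, pvGrpFold]
    exact pv_foldl_prod t
      (fun d p => d.insert p.1 (min (d.getD p.1 (p.2, p.2)).1 p.2, max (d.getD p.1 (p.2, p.2)).2 p.2))
      (fun d p => d.insert p.2 (min (d.getD p.2 (p.1, p.1)).1 p.1, max (d.getD p.2 (p.1, p.1)).2 p.1))
      PySem.Dict.empty PySem.Dict.empty
  rw [hgrp, drawA_eq, drawB_row_eq, drawB_col_eq, ← List.foldl_append]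
  exact foldl_write_ext _ _ m (pv_writes_ext t)


theorem pv_main (tcords : List (Int × Int)) (maxX maxY : Int) :
    buildMask tcords maxX maxY = buildMask_alt tcords maxX maxY := by
  unfold buildMask buildMask_alt
  simp only [PySem.List.foldl_append_singleton_eq_map, List.nil_append]
  exact congrArg pvFloodFill (pv_main_draw tcords _)

-- ===== VERDICT (by name: the statement is the Claim_ definition above) =====
theorem buildMask_spec : Claim_equal_buildMask := by
  intro tcords maxX maxY _ _
  unfold Spec_buildMask
  exact pv_main tcords maxX maxY
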